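-- pv_equiv track=rewrite | github.com/satya-666/LeetCode | 2640-find-the-score-of-all-prefixes-of-an-array/2640-find-the-score-of-all-prefixes-of-an-array.py | findPrefixScore
-- ===== SOURCE A (Python) =====
-- def findPrefixScore(nums):
--     ans = []
--     max_so_far = float('-inf')
--     score = 0
--
--     for i in range(len(nums)):
--         max_so_far = max(max_so_far, nums[i])
--         conver_value = nums[i] + max_so_far
--         score += conver_value
--         ans.append(score)
--
--     return(ans)
-- ===== SOURCE B (Python) =====
-- def _accumulate(xs, f):
--     out = []
--     it = iter(xs)
--     try:
--         a = next(it)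
--     except StopIteration:
--         return out
--     out.append(a)
--     for x in it:
--         a = f(a, x)
--         out.append(a)
--     return out
--
--
-- def findPrefixScore(nums):
--     prefmax = _accumulate(nums, max)
--     conv = [n + m for n, m in zip(nums, prefmax)]
--     return _accumulate(conv, lambda a, b: a + b)
-- ===== Notes on version B (the rewrite author's own statement) =====
-- stated objective: alternative
-- what changed: Replaces the single fused loop (running max, conversion value and running sum in one pass) with three separate tabulated passes: a prefix-max accumulate, a zip/map for the conversion values, and a prefix-sum accumulate.
import Mathlib
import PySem

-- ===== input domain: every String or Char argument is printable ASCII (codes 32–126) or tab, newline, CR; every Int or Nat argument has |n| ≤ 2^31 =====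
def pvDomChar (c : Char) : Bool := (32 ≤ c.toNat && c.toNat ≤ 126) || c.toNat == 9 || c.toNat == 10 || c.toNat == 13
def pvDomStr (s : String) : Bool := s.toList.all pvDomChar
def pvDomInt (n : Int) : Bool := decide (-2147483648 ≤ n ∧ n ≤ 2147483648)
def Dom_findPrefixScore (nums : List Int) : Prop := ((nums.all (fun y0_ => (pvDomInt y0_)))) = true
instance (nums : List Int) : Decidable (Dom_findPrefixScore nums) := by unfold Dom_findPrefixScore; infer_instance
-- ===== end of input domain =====

-- B replaces A's single fused loop with three separate passes (prefix-max accumulate, zip/map conversion, prefix-sum accumulate); alternative decomposition, same cost.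


-- ===== PORT A =====
-- max_so_far starts as float('-inf'); modelled as Option Int with none = -inf
-- (only ints are ever compared against it, so this is exact).
def pvAmax (m : Option Int) (x : Int) : Int :=
  match m with
  | none => x
  | some v => max v x

def findPrefixScore (nums : List Int) : List Int :=
  (nums.foldl
    (fun (st : List Int × Option Int × Int) x =>
      let max_so_far := pvAmax st.2.1 x
      let conver_value := x + max_so_far
      let score := st.2.2 + conver_value
      (st.1 ++ [score], some max_so_far, score))
    ([], none, 0)).1

-- ===== PORT B =====
-- itertools.accumulate-style helper (as hand-written in Source B)
def pvAccumGo (f : Int → Int → Int) (a : Int) : List Int → List Int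
  | [] => []
  | y :: ys => f a y :: pvAccumGo f (f a y) ys

def pvAccum (f : Int → Int → Int) : List Int → List Int
  | [] => []
  | x :: xs => x :: pvAccumGo f x xs

def findPrefixScore_alt (nums : List Int) : List Int :=
  let prefmax := pvAccum max nums
  let conv := (nums.zip prefmax).map (fun p => p.1 + p.2)
  pvAccum (· + ·) conv

-- ===== PRECONDITION & SPEC =====
def Spec_findPrefixScore (nums : List Int) (out : List Int) : Prop := out = findPrefixScore_alt nums
instance (nums : List Int) (out : List Int) : Decidable (Spec_findPrefixScore nums out) := by unfold Spec_findPrefixScore; infer_instance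

-- ===== CLAIM (what is proved, stated in full; the proofs are below) =====
def Claim_equal_findPrefixScore : Prop := ∀ (nums : List Int), Dom_findPrefixScore nums → Spec_findPrefixScore nums (findPrefixScore nums)

-- ===== LEMMAS AND PROOFS =====

-- common recursive characterisation of the prefix scores
def pvSpecList (xs : List Int) (m : Option Int) (s : Int) : List Int :=
  match xs with
  | [] => []
  | x :: rest =>
    let m' := pvAmax m x
    let s' := s + (x + m')
    s' :: pvSpecList rest (some m') s'

theorem pvA_char (xs : List Int) : ∀ (acc : List Int) (m : Option Int) (s : Int),
    (xs.foldl
      (fun (st : List Int × Option Int × Int) x =>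
        let max_so_far := pvAmax st.2.1 x
        let conver_value := x + max_so_far
        let score := st.2.2 + conver_value
        (st.1 ++ [score], some max_so_far, score))
      (acc, m, s)).1 = acc ++ pvSpecList xs m s := by
  induction xs with
  | nil => intro acc m s; simp [pvSpecList]
  | cons x rest ih =>
    intro acc m s
    simp only [List.foldl, pvSpecList]
    rw [ih]
    simp

theorem pvB_char (xs : List Int) : ∀ (v s : Int),
    pvAccumGo (· + ·) s ((xs.zip (pvAccumGo max v xs)).map (fun p => p.1 + p.2))
      = pvSpecList xs (some v) s := by
  induction xs with
  | nil => intro v s; simp [pvAccumGo, pvSpecList]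
  | cons x rest ih =>
    intro v s
    simp only [pvAccumGo, List.zip_cons_cons, List.map, pvSpecList, pvAmax]
    rw [ih]

-- ===== VERDICT (by name: the statement is the Claim_ definition above) =====
theorem findPrefixScore_spec : Claim_equal_findPrefixScore := by
  intro nums _
  show findPrefixScore nums = findPrefixScore_alt nums
  cases nums with
  | nil => rfl
  | cons x rest =>
    unfold findPrefixScore findPrefixScore_alt
    rw [pvA_char]
    simp only [pvAccum, List.zip_cons_cons, List.map, pvSpecList, pvAmax, List.nil_append]
    rw [pvB_char, zero_add]
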